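-- pv_equiv track=rewrite | github.com/Sbrg33/vedacore-api | src/refactor/kp_star_links.py | find_mutual_star_connections
-- ===== SOURCE A (Python) =====
-- def find_mutual_star_connections(
--     planet_positions: dict[int, dict],
-- ) -> list[tuple[int, int]]:
--     """
--     Find planets in mutual nakshatra exchange.
--
--     Example: If Mars is in Venus's nakshatra and Venus is in Mars's nakshatra.
--
--     Args:
--         planet_positions: All planet data
--
--     Returns:
--         List of planet pairs in mutual star exchange
--     """
--     mutual_pairs = []
--     checked = set()
--
--     for planet1 in planet_positions:
--         for planet2 in planet_positions:
--             if planet1 >= planet2:  # Avoid duplicates and self-comparison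
--                 continue
--
--             pair = tuple(sorted([planet1, planet2]))
--             if pair in checked:
--                 continue
--             checked.add(pair)
--
--             # Check if planet1 is in planet2's star
--             p1_data = planet_positions[planet1]
--             p1_star_lord = p1_data.get("nl", 0)
--
--             # Check if planet2 is in planet1's star
--             p2_data = planet_positions[planet2]
--             p2_star_lord = p2_data.get("nl", 0)
--
--             # Mutual exchange exists if each is in other's star
--             if p1_star_lord == planet2 and p2_star_lord == planet1:
--                 mutual_pairs.append(pair)
--
--     return mutual_pairs
-- ===== SOURCE B (Python) =====
-- def find_mutual_star_connections(
--     planet_positions: dict[int, dict],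
-- ) -> list[tuple[int, int]]:
--     """Single pass: precompute each planet's star lord, then check reciprocity by lookup."""
--     lords = {p: d.get("nl", 0) for p, d in planet_positions.items()}
--     pairs = []
--     for p, q in lords.items():
--         if p < q and lords.get(q) == p:
--             pairs.append((p, q))
--     return pairs
-- ===== Notes on version B (the rewrite author's own statement) =====
-- stated objective: faster
-- what changed: Replaces the O(n^2) nested scan over all planet pairs (with a redundant 'checked' set) by a single pass that precomputes each planet's star lord in a dict and tests reciprocity by direct lookup.
import Mathlib
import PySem

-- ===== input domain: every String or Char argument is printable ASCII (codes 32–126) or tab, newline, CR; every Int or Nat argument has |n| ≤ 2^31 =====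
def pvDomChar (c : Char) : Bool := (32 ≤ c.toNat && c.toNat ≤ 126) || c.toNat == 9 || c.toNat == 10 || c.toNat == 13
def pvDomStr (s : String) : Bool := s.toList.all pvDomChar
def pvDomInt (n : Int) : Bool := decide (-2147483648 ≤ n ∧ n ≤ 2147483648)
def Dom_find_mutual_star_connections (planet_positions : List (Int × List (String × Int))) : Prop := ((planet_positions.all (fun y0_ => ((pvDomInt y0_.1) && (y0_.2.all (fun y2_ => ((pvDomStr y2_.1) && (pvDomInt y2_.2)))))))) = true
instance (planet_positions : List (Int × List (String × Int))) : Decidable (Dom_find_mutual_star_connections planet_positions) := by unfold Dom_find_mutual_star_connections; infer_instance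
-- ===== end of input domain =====

-- B replaces A's O(n^2) nested pair scan by one pass over a precomputed star-lord dict (faster, asymptotic).


-- ===== PORT A =====
-- tuple(sorted([p1, p2])): tuple of the sorted 2-element list (exact for 2-element lists)
def pvPairOf (p1 p2 : Int) : Int × Int :=
  let s := PySem.List.sorted [p1, p2] (fun x => x) false
  (s.headD 0, (s.drop 1).headD 0)

-- p_data = planet_positions[planet]; p_data.get("nl", 0).  The outer lookup's `.getD []`
-- can never fire in A: planet always comes from the dict's own keys.
def pvLord (planet_positions : List (Int × List (String × Int))) (p : Int) : Int :=
  PySem.Dict.getD (PySem.Dict.mk ((PySem.Dict.get? (PySem.Dict.mk planet_positions) p).getD [])) "nl" 0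

-- the body of A's inner loop; state = (mutual_pairs, checked)
def pvStepA (planet_positions : List (Int × List (String × Int))) (planet1 : Int)
    (st : List (Int × Int) × PySem.Set (Int × Int)) (planet2 : Int) :
    List (Int × Int) × PySem.Set (Int × Int) :=
  if planet1 ≥ planet2 then st
  else
    let pair := pvPairOf planet1 planet2
    if PySem.Set.contains st.2 pair then st
    else
      let checked := PySem.Set.add st.2 pair
      let p1_star_lord := pvLord planet_positions planet1
      let p2_star_lord := pvLord planet_positions planet2
      if p1_star_lord = planet2 ∧ p2_star_lord = planet1 then (st.1 ++ [pair], checked)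
      else (st.1, checked)

def find_mutual_star_connections (planet_positions : List (Int × List (String × Int))) : List (Int × Int) :=
  let keys := planet_positions.map (fun kv => kv.1)   -- iteration over the dict's keys
  (keys.foldl (fun st planet1 => keys.foldl (pvStepA planet_positions planet1) st)
    ([], PySem.Set.empty)).1

-- ===== PORT B =====
def find_mutual_star_connections_alt (planet_positions : List (Int × List (String × Int))) : List (Int × Int) :=
  -- lords = {p: d.get("nl", 0) for p, d in planet_positions.items()}
  let lords : PySem.Dict Int Int :=
    planet_positions.foldl
      (fun d kv => d.insert kv.1 (PySem.Dict.getD (PySem.Dict.mk kv.2) "nl" 0)) PySem.Dict.empty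
  -- for p, q in lords.items(): if p < q and lords.get(q) == p: pairs.append((p, q))
  lords.items.foldl
    (fun pairs pq =>
      if decide (pq.1 < pq.2) && (lords.get? pq.2 == some pq.1) then pairs ++ [(pq.1, pq.2)]
      else pairs) []

-- ===== PRECONDITION & SPEC =====
-- Pre_ excludes association lists with duplicate outer planet ids or duplicate inner field
-- names: a Python dict cannot hold duplicate keys (a literal collapses them, last value wins),
-- so first-match lookup on such lists is a modeling accident, not A's behaviour.
def Pre_find_mutual_star_connections (planet_positions : List (Int × List (String × Int))) : Prop :=
  (planet_positions.map (fun kv => kv.1)).Nodup ∧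
  ∀ kv ∈ planet_positions, (kv.2.map (fun e => e.1)).Nodup
instance (planet_positions : List (Int × List (String × Int))) : Decidable (Pre_find_mutual_star_connections planet_positions) := by unfold Pre_find_mutual_star_connections; infer_instance

def pvWitness_find_mutual_star_connections : (List (Int × List (String × Int))) :=
  [(1, [("nl", 2)]), (2, [("nl", 1)]), (3, [])]

def Spec_find_mutual_star_connections (planet_positions : List (Int × List (String × Int))) (out : List (Int × Int)) : Prop := out = find_mutual_star_connections_alt planet_positions
instance (planet_positions : List (Int × List (String × Int))) (out : List (Int × Int)) : Decidable (Spec_find_mutual_star_connections planet_positions out) := by unfold Spec_find_mutual_star_connections; infer_instance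

-- ===== CLAIM (what is proved, stated in full; the proofs are below) =====
def Claim_equal_find_mutual_star_connections : Prop := ∀ (planet_positions : List (Int × List (String × Int))), Dom_find_mutual_star_connections planet_positions → Pre_find_mutual_star_connections planet_positions → Spec_find_mutual_star_connections planet_positions (find_mutual_star_connections planet_positions)

-- ===== LEMMAS AND PROOFS =====

theorem pvPairOf_of_lt {p1 p2 : Int} (h : p1 < p2) : pvPairOf p1 p2 = (p1, p2) := by
  have : PySem.List.sorted [p1, p2] (fun x => x) = [p1, p2] :=
    PySem.List.sorted_eq_self_of_pairwise _ _ (by simp [le_of_lt h])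
  simp [pvPairOf, this]

theorem pvInnerA (pp : List (Int × List (String × Int))) (p1 : Int) :
    ∀ (l : List Int) (acc : List (Int × Int)) (chk : PySem.Set (Int × Int)),
      l.Nodup → (∀ b ∈ l, (p1, b) ∉ chk) →
      (l.foldl (pvStepA pp p1) (acc, chk)).1
        = acc ++ l.filterMap (fun p2 =>
            if p1 < p2 ∧ pvLord pp p1 = p2 ∧ pvLord pp p2 = p1 then some (p1, p2) else none)
      ∧ ∀ x ∈ (l.foldl (pvStepA pp p1) (acc, chk)).2, x ∈ chk ∨ x.1 = p1 := by
  intro l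
  induction l with
  | nil => intro acc chk _ _; exact ⟨by simp, fun x hx => Or.inl hx⟩
  | cons b t ih =>
    intro acc chk hnd hfresh
    rw [List.nodup_cons] at hnd
    rw [List.foldl_cons]
    by_cases hge : p1 ≥ b
    · have hstep : pvStepA pp p1 (acc, chk) b = (acc, chk) := by simp [pvStepA, hge]
      rw [hstep]
      have := ih acc chk hnd.2 (fun b' hb' => hfresh b' (List.mem_cons_of_mem _ hb'))
      refine ⟨?_, this.2⟩
      rw [this.1]; simp [not_lt_of_ge hge]
    · have hlt : p1 < b := lt_of_not_ge hge
      have hpair := pvPairOf_of_lt hlt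
      have hnotmem : (p1, b) ∉ chk := hfresh b (List.mem_cons_self ..)
      have hfresh' : ∀ b' ∈ t, (p1, b') ∉ PySem.Set.add chk (p1, b) := by
        intro b' hb'
        rw [PySem.Set.mem_add]
        rintro (h | h)
        · exact hfresh b' (List.mem_cons_of_mem _ hb') h
        · have hb : b' = b := congrArg Prod.snd h
          exact hnd.1 (hb ▸ hb')
      have hmono : ∀ x : Int × Int, x ∈ PySem.Set.add chk (p1, b) ∨ x.1 = p1 → x ∈ chk ∨ x.1 = p1 := by
        intro x hx
        rcases hx with h | h
        · rcases (PySem.Set.mem_add _ _ _).1 h with h | h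
          · exact Or.inl h
          · exact Or.inr (by rw [h])
        · exact Or.inr h
      by_cases hc : pvLord pp p1 = b ∧ pvLord pp b = p1
      · have hstep : pvStepA pp p1 (acc, chk) b = (acc ++ [(p1, b)], PySem.Set.add chk (p1, b)) := by
          simp [pvStepA, hge, hpair, PySem.Set.contains, hnotmem, hc]
        rw [hstep]
        have := ih (acc ++ [(p1, b)]) (PySem.Set.add chk (p1, b)) hnd.2 hfresh'
        refine ⟨?_, fun x hx => hmono x (this.2 x hx)⟩
        rw [this.1]; simp [hlt, hc]
      · have hstep : pvStepA pp p1 (acc, chk) b = (acc, PySem.Set.add chk (p1, b)) := by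
          simp [pvStepA, hge, hpair, PySem.Set.contains, hnotmem, hc]
        rw [hstep]
        have := ih acc (PySem.Set.add chk (p1, b)) hnd.2 hfresh'
        refine ⟨?_, fun x hx => hmono x (this.2 x hx)⟩
        rw [this.1]
        have hno : ¬ (p1 < b ∧ pvLord pp p1 = b ∧ pvLord pp b = p1) := fun h => hc ⟨h.2.1, h.2.2⟩
        simp [hno]

theorem pvOuterA (pp : List (Int × List (String × Int))) (keys : List Int) (hk : keys.Nodup) :
    ∀ (l : List Int), l.Nodup → ∀ (acc : List (Int × Int)) (chk : PySem.Set (Int × Int)),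
      (∀ x ∈ chk, x.1 ∉ l) →
      (l.foldl (fun st p1 => keys.foldl (pvStepA pp p1) st) (acc, chk)).1
        = acc ++ l.flatMap (fun p1 => keys.filterMap (fun p2 =>
            if p1 < p2 ∧ pvLord pp p1 = p2 ∧ pvLord pp p2 = p1 then some (p1, p2) else none)) := by
  intro l
  induction l with
  | nil => intro _ acc chk _; simp
  | cons a t ih =>
    intro hnd acc chk hchk
    rw [List.nodup_cons] at hnd
    rw [List.foldl_cons]
    have hfresh : ∀ b ∈ keys, (a, b) ∉ chk := by
      intro b _ hmem
      exact hchk (a, b) hmem (List.mem_cons_self ..)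
    have hin := pvInnerA pp a keys acc chk hk hfresh
    have hst : keys.foldl (pvStepA pp a) (acc, chk)
        = ((keys.foldl (pvStepA pp a) (acc, chk)).1, (keys.foldl (pvStepA pp a) (acc, chk)).2) := rfl
    rw [hst]
    have hchk' : ∀ x ∈ (keys.foldl (pvStepA pp a) (acc, chk)).2, x.1 ∉ t := by
      intro x hx ht
      rcases hin.2 x hx with h | h
      · exact hchk x h (List.mem_cons_of_mem _ ht)
      · exact hnd.1 (h ▸ ht)
    rw [ih hnd.2 _ _ hchk', hin.1]
    simp

theorem pvFilterMapSingle (p1 q : Int) (P : Int → Prop) [DecidablePred P] :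
    ∀ (keys : List Int), keys.Nodup →
      keys.filterMap (fun p2 => if p1 < p2 ∧ q = p2 ∧ P p2 then some (p1, p2) else none)
        = if p1 < q ∧ q ∈ keys ∧ P q then [(p1, q)] else [] := by
  intro keys
  induction keys with
  | nil => intro _; simp
  | cons a t ih =>
    intro hnd
    rw [List.nodup_cons] at hnd
    by_cases ha : p1 < a ∧ q = a ∧ P a
    · obtain ⟨h1, h2, h3⟩ := ha
      subst h2
      simp [h1, h3, ih hnd.2, hnd.1]
    · rw [List.filterMap_cons, if_neg ha, ih hnd.2]
      by_cases hq : p1 < q ∧ q ∈ t ∧ P q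
      · rw [if_pos hq, if_pos ⟨hq.1, List.mem_cons_of_mem _ hq.2.1, hq.2.2⟩]
      · rw [if_neg hq, if_neg ?_]
        rintro ⟨h1, h2, h3⟩
        rcases List.mem_cons.1 h2 with h | h
        · exact ha ⟨h ▸ h1, h, h ▸ h3⟩
        · exact hq ⟨h1, h, h3⟩

theorem pvGetMem (pp : List (Int × List (String × Int)))
    (hk : (pp.map (fun kv => kv.1)).Nodup) {kv : Int × List (String × Int)} (hm : kv ∈ pp) :
    PySem.Dict.get? (PySem.Dict.mk pp) kv.1 = some kv.2 := by
  induction pp with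
  | nil => cases hm
  | cons a t ih =>
    rw [List.map_cons, List.nodup_cons] at hk
    rcases List.mem_cons.1 hm with h | h
    · subst h
      rw [PySem.Dict.get?_mk_cons, if_pos (by simp)]
    · have hne : a.1 ≠ kv.1 := fun he => hk.1 (he ▸ List.mem_map_of_mem h)
      rw [PySem.Dict.get?_mk_cons]
      rw [if_neg (by simpa using hne)]
      exact ih hk.2 h

theorem pvGetNone (pp : List (Int × List (String × Int))) (q : Int)
    (h : PySem.Dict.get? (PySem.Dict.mk pp) q = none) : q ∉ pp.map (fun kv => kv.1) := by
  simp only [PySem.Dict.get?, Option.map_eq_none_iff, List.find?_eq_none] at h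
  intro hq
  rcases List.mem_map.1 hq with ⟨kv, hkv, hfst⟩
  exact h kv hkv (by simp [hfst])

theorem pvGetSomeMem (pp : List (Int × List (String × Int))) (q : Int) (d : List (String × Int))
    (h : PySem.Dict.get? (PySem.Dict.mk pp) q = some d) : q ∈ pp.map (fun kv => kv.1) := by
  simp only [PySem.Dict.get?, Option.map_eq_some_iff] at h
  rcases h with ⟨kv, hfind, _⟩
  have hm := List.mem_of_find?_eq_some hfind
  have hp := List.find?_some hfind
  simp at hp
  exact hp ▸ List.mem_map_of_mem hm

theorem pvGetMapped {ν ν' : Type} (h : ν → ν') (l : List (Int × ν)) (q : Int) :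
    PySem.Dict.get? (PySem.Dict.mk (l.map (fun kv => (kv.1, h kv.2)))) q
      = (PySem.Dict.get? (PySem.Dict.mk l) q).map h := by
  simp [PySem.Dict.get?, List.find?_map, Option.map_map]
  rfl

theorem pvFlatMapFilter {α β : Type} (l : List α) (q : α → Bool) (g : α → β) :
    ((l.filter q).map g) = l.flatMap (fun x => if q x then [g x] else []) := by
  induction l with
  | nil => simp
  | cons a t ih =>
    by_cases h : q a <;> simp [h, ih]

theorem pvLordMem (pp : List (Int × List (String × Int)))
    (hk : (pp.map (fun kv => kv.1)).Nodup) {kv : Int × List (String × Int)} (hm : kv ∈ pp) :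
    pvLord pp kv.1 = PySem.Dict.getD (PySem.Dict.mk kv.2) "nl" 0 := by
  unfold pvLord; rw [pvGetMem pp hk hm]; rfl

theorem pvLordOfGet (pp : List (Int × List (String × Int))) (q : Int) (d : List (String × Int))
    (hq : PySem.Dict.get? (PySem.Dict.mk pp) q = some d) :
    pvLord pp q = PySem.Dict.getD (PySem.Dict.mk d) "nl" 0 := by
  unfold pvLord; rw [hq]; rfl

theorem mainthm (pp : List (Int × List (String × Int)))
    (hk : (pp.map (fun kv => kv.1)).Nodup) :
    find_mutual_star_connections pp = find_mutual_star_connections_alt pp := by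
  -- A side
  have hA : find_mutual_star_connections pp
      = (pp.map (fun kv => kv.1)).flatMap (fun p1 => (pp.map (fun kv => kv.1)).filterMap (fun p2 =>
          if p1 < p2 ∧ pvLord pp p1 = p2 ∧ pvLord pp p2 = p1 then some (p1, p2) else none)) := by
    have := pvOuterA pp (pp.map (fun kv => kv.1)) hk (pp.map (fun kv => kv.1)) hk [] PySem.Set.empty
      (by intro x hx; simp [PySem.Set.empty] at hx)
    simpa [find_mutual_star_connections] using this
  rw [hA]
  have hA2 : ∀ p1 : Int, (pp.map (fun kv => kv.1)).filterMap (fun p2 =>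
      if p1 < p2 ∧ pvLord pp p1 = p2 ∧ pvLord pp p2 = p1 then some (p1, p2) else none)
      = if p1 < pvLord pp p1 ∧ pvLord pp p1 ∈ pp.map (fun kv => kv.1) ∧ pvLord pp (pvLord pp p1) = p1
        then [(p1, pvLord pp p1)] else [] :=
    fun p1 => pvFilterMapSingle p1 (pvLord pp p1) (fun p2 => pvLord pp p2 = p1) _ hk
  rw [List.flatMap_congr (fun p1 _ => hA2 p1), List.flatMap_map]
  -- B side
  have hlords : (pp.foldl (fun d kv => d.insert kv.1 (PySem.Dict.getD (PySem.Dict.mk kv.2) "nl" 0)) PySem.Dict.empty)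
      = PySem.Dict.mk (pp.map (fun kv => (kv.1, PySem.Dict.getD (PySem.Dict.mk kv.2) "nl" 0))) := by
    apply PySem.Dict.ext
    rw [PySem.Dict.items_foldl_insert_fresh pp (fun kv => kv.1)
      (fun kv => PySem.Dict.getD (PySem.Dict.mk kv.2) "nl" 0) PySem.Dict.empty
      (by intro a _; simp [PySem.Dict.empty, PySem.Dict.contains]) hk]
    simp [PySem.Dict.empty]
  have hB : find_mutual_star_connections_alt pp
      = ((pp.map (fun kv => (kv.1, PySem.Dict.getD (PySem.Dict.mk kv.2) "nl" 0))).filter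
          (fun pq => decide (pq.1 < pq.2) &&
            (PySem.Dict.get? (PySem.Dict.mk (pp.map (fun kv => (kv.1, PySem.Dict.getD (PySem.Dict.mk kv.2) "nl" 0)))) pq.2 == some pq.1))).map
          (fun pq => (pq.1, pq.2)) := by
    simp only [find_mutual_star_connections_alt, hlords, PySem.List.foldl_append_if]
    rfl
  rw [hB]
  have heta : (fun pq : Int × Int => (pq.1, pq.2)) = fun pq => pq := rfl
  rw [heta, List.map_id', List.filter_map, pvFlatMapFilter]
  apply List.flatMap_congr
  intro kv hkv
  have hg : PySem.Dict.getD (PySem.Dict.mk kv.2) "nl" 0 = pvLord pp kv.1 := (pvLordMem pp hk hkv).symm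
  simp only [Function.comp, hg]
  rw [pvGetMapped (fun d => PySem.Dict.getD (PySem.Dict.mk d) "nl" 0) pp (pvLord pp kv.1)]
  cases hq : PySem.Dict.get? (PySem.Dict.mk pp) (pvLord pp kv.1) with
  | none =>
    have hnm := pvGetNone pp _ hq
    rw [if_neg (by rintro ⟨_, h2, _⟩; exact hnm h2)]
    simp
  | some d =>
    have hmem := pvGetSomeMem pp _ d hq
    rw [pvLordOfGet pp _ d hq]
    by_cases h1 : kv.1 < pvLord pp kv.1
    · by_cases h2 : PySem.Dict.getD (PySem.Dict.mk d) "nl" 0 = kv.1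
      · rw [if_pos ⟨h1, hmem, h2⟩]; simp [h1, h2]
      · rw [if_neg (by rintro ⟨_, _, h⟩; exact h2 h)]; simp [h2]
    · rw [if_neg (by rintro ⟨h, _, _⟩; exact h1 h)]; simp [h1]

-- ===== VERDICT (by name: the statement is the Claim_ definition above) =====
theorem find_mutual_star_connections_spec : Claim_equal_find_mutual_star_connections := by
  intro pp _ hpre
  unfold Spec_find_mutual_star_connections
  exact mainthm pp hpre.1
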